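-- pv_equiv track=rewrite | github.com/plat16022005/do-an-AI | Code/QuanCo.py | ChuyenDoiSangFEN
-- ===== SOURCE A (Python) =====
-- def ChuyenDoiSangFEN(banco_matrix, luot):
--     """
--     Chuyển đổi bàn cờ từ định dạng của bạn sang FEN.
--     - banco_matrix: Ma trận 8x8 mô tả bàn cờ.
--     - luot: Lượt đi hiện tại ('t' hoặc 'd').
--     - Trả về chuỗi FEN.
--     """
--     quan_co_to_fen = {
--         'tt': 'P', 'td': 'p',
--         'nt': 'N', 'nd': 'n',
--         'xt': 'R', 'xd': 'r',
--         'Tt': 'B', 'Td': 'b',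
--         'ht': 'Q', 'hd': 'q',
--         'vt': 'K', 'vd': 'k',
--         '-': '1'
--     }
--
--     fen_position = []
--     for row in banco_matrix:
--         fen_row = []
--         empty_count = 0
--         for cell in row:
--             if cell == '-':
--                 empty_count += 1
--             else:
--                 if empty_count > 0:
--                     fen_row.append(str(empty_count))
--                     empty_count = 0
--                 fen_row.append(quan_co_to_fen[cell])
--         if empty_count > 0:
--             fen_row.append(str(empty_count))
--         fen_position.append(''.join(fen_row))
--     fen_position = '/'.join(fen_position)
--
--     fen_turn = 'w' if luot == 't' else 'b'
--     fen_castling = 'KQkq'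
--     fen_en_passant = '-'
--     fen_halfmove_clock = '0'
--     fen_fullmove_number = '1'
--
--     fen = f"{fen_position} {fen_turn} {fen_castling} {fen_en_passant} {fen_halfmove_clock} {fen_fullmove_number}"
--     return fen
-- ===== SOURCE B (Python) =====
-- def _nen(s):
--     # second pass: compress runs of '.' placeholders into their decimal length
--     parts = []
--     i = 0
--     while i < len(s):
--         if s[i] == '.':
--             j = i
--             while j < len(s) and s[j] == '.':
--                 j += 1
--             parts.append(str(j - i))
--             i = j
--         else:
--             parts.append(s[i])
--             i += 1
--     return ''.join(parts)
--
--
-- def ChuyenDoiSangFEN(banco_matrix, luot):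
--     quan_co_to_fen = {
--         'tt': 'P', 'td': 'p',
--         'nt': 'N', 'nd': 'n',
--         'xt': 'R', 'xd': 'r',
--         'Tt': 'B', 'Td': 'b',
--         'ht': 'Q', 'hd': 'q',
--         'vt': 'K', 'vd': 'k',
--         '-': '1'
--     }
--     # first pass per row: map every cell to one character ('.' marks an empty cell),
--     # then compress the placeholder runs in a separate second pass (no running counter)
--     rows = [
--         _nen(''.join('.' if cell == '-' else quan_co_to_fen[cell] for cell in row))
--         for row in banco_matrix
--     ]
--     fen_position = '/'.join(rows)
--     fen_turn = 'w' if luot == 't' else 'b'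
--     return f"{fen_position} {fen_turn} KQkq - 0 1"
-- ===== Notes on version B (the rewrite author's own statement) =====
-- stated objective: alternative
-- what changed: Per row, B first maps every cell to a single character ('.' placeholder for empty, dict letter otherwise) and then compresses the '.' runs in a separate second pass over that string, instead of A's single pass threading a running empty_count accumulator.
import Mathlib
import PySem

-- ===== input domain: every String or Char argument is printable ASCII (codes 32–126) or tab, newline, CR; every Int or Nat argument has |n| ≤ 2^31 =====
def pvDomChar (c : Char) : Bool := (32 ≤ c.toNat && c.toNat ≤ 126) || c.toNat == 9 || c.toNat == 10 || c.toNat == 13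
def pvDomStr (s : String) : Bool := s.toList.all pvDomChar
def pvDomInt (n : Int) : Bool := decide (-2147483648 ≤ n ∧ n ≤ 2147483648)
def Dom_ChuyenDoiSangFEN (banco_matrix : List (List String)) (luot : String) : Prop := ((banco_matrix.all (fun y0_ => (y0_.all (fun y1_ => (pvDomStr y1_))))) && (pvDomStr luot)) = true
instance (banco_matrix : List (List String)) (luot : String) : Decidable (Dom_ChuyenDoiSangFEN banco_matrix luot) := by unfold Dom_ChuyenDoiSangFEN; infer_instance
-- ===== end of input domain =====

-- B replaces A's single pass with a running empty counter by a per-row two-phase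
-- map-to-placeholder-string then compress-placeholder-runs decomposition (objective: alternative).

-- the piece dict, shared verbatim by both Pythons
def quanCoToFen : PySem.Dict String String :=
  PySem.Dict.mk [("tt", "P"), ("td", "p"), ("nt", "N"), ("nd", "n"), ("xt", "R"), ("xd", "r"),
                 ("Tt", "B"), ("Td", "b"), ("ht", "Q"), ("hd", "q"), ("vt", "K"), ("vd", "k"), ("-", "1")]

-- ===== PORT A =====
-- A's inner loop: state (fen_row, empty_count); the dict lookup uses default "" —
-- Python raises KeyError there, excluded by Pre_.
def rowA : List String → List String → Nat → List String
  | [], fenRow, ec => if ec > 0 then fenRow ++ [PySem.Int.toStr (ec : Int)] else fenRow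
  | cell :: cs, fenRow, ec =>
    if cell = "-" then rowA cs fenRow (ec + 1)
    else rowA cs ((if ec > 0 then fenRow ++ [PySem.Int.toStr (ec : Int)] else fenRow) ++ [quanCoToFen.getD cell ""]) 0

def ChuyenDoiSangFEN (banco_matrix : List (List String)) (luot : String) : String :=
  let fenPosition := PySem.Str.join "/" (banco_matrix.map (fun row => PySem.Str.join "" (rowA row [] 0)))
  let fenTurn := if luot = "t" then "w" else "b"
  let fenCastling := "KQkq"
  let fenEnPassant := "-"
  let fenHalfmove := "0"
  let fenFullmove := "1"
  fenPosition ++ " " ++ fenTurn ++ " " ++ fenCastling ++ " " ++ fenEnPassant ++ " " ++ fenHalfmove ++ " " ++ fenFullmove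

-- ===== PORT B =====
-- B's compress pass _nen, on the mapped characters: a run of '.' becomes its length
def nen : List Char → List String
  | [] => []
  | c :: rest =>
    if c = '.' then
      PySem.Int.toStr (((c :: rest).takeWhile (· == '.')).length : Int) :: nen (rest.dropWhile (· == '.'))
    else String.ofList [c] :: nen rest
termination_by l => l.length
decreasing_by
  · have := List.length_dropWhile_le (· == '.') rest; simp; omega
  · simp

def ChuyenDoiSangFEN_alt (banco_matrix : List (List String)) (luot : String) : String :=
  let rows := banco_matrix.map (fun row =>
    PySem.Str.join "" (nen (PySem.Str.join "" (row.map (fun cell =>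
      if cell = "-" then "." else quanCoToFen.getD cell ""))).toList))
  let fenPosition := PySem.Str.join "/" rows
  let fenTurn := if luot = "t" then "w" else "b"
  fenPosition ++ " " ++ fenTurn ++ " KQkq - 0 1"

-- ===== PRECONDITION & SPEC =====
-- Pre_ excludes exactly the boards with a cell outside the piece dict (and not "-"):
-- on those both Pythons raise KeyError at the same cell.
def validCell (c : String) : Bool :=
  c == "tt" || c == "td" || c == "nt" || c == "nd" || c == "xt" || c == "xd" ||
  c == "Tt" || c == "Td" || c == "ht" || c == "hd" || c == "vt" || c == "vd" || c == "-"

def Pre_ChuyenDoiSangFEN (banco_matrix : List (List String)) (luot : String) : Prop :=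
  banco_matrix.all (fun row => row.all validCell) = true
instance (banco_matrix : List (List String)) (luot : String) : Decidable (Pre_ChuyenDoiSangFEN banco_matrix luot) := by unfold Pre_ChuyenDoiSangFEN; infer_instance

def pvWitness_ChuyenDoiSangFEN : List (List String) × String :=
  ([["tt", "-", "-"], ["-", "vd", "ht"]], "t")

def Spec_ChuyenDoiSangFEN (banco_matrix : List (List String)) (luot : String) (out : String) : Prop := out = ChuyenDoiSangFEN_alt banco_matrix luot
instance (banco_matrix : List (List String)) (luot : String) (out : String) : Decidable (Spec_ChuyenDoiSangFEN banco_matrix luot out) := by unfold Spec_ChuyenDoiSangFEN; infer_instance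

-- ===== CLAIM (what is proved, stated in full; the proofs are below) =====
def Claim_equal_ChuyenDoiSangFEN : Prop := ∀ (banco_matrix : List (List String)) (luot : String), Dom_ChuyenDoiSangFEN banco_matrix luot → Pre_ChuyenDoiSangFEN banco_matrix luot → Spec_ChuyenDoiSangFEN banco_matrix luot (ChuyenDoiSangFEN banco_matrix luot)

-- ===== LEMMAS AND PROOFS =====

-- the per-cell character B's first phase produces (proof-side abbreviation)
def mapChar (cell : String) : Char :=
  if cell = "-" then '.'
  else ((quanCoToFen.getD cell "").toList).headD '?'

lemma mapChar_ne_dot (c : String) (hv : validCell c = true) (hne : c ≠ "-") : mapChar c ≠ '.' := by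
  simp only [validCell, Bool.or_eq_true, beq_iff_eq] at hv
  rcases hv with (((((((((((h|h)|h)|h)|h)|h)|h)|h)|h)|h)|h)|h)|h <;> subst h <;> first | decide | exact absurd rfl hne

lemma cell_toList (c : String) (hv : validCell c = true) (hne : c ≠ "-") :
    (quanCoToFen.getD c "").toList = [mapChar c] := by
  simp only [validCell, Bool.or_eq_true, beq_iff_eq] at hv
  rcases hv with (((((((((((h|h)|h)|h)|h)|h)|h)|h)|h)|h)|h)|h)|h <;> subst h <;> first | decide | exact absurd rfl hne

lemma takeWhile_replicate_dot (k : Nat) (l : List Char) (hl : l.headD 'x' ≠ '.') :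
    (List.replicate k '.' ++ l).takeWhile (· == '.') = List.replicate k '.' := by
  induction k with
  | zero => cases l with
    | nil => simp
    | cons c t => simp at hl ⊢; simp [hl]
  | succ n ih => simp [List.replicate_succ, ih]

lemma dropWhile_replicate_dot (k : Nat) (l : List Char) (hl : l.headD 'x' ≠ '.') :
    (List.replicate k '.' ++ l).dropWhile (· == '.') = l := by
  induction k with
  | zero => cases l with
    | nil => simp
    | cons c t => simp at hl ⊢; simp [hl]
  | succ n ih => simp [List.replicate_succ, ih]

lemma nen_replicate (k : Nat) (l : List Char) (hl : l.headD 'x' ≠ '.') :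
    nen (List.replicate k '.' ++ l) =
      (if k > 0 then [PySem.Int.toStr (k : Int)] else []) ++ nen l := by
  cases k with
  | zero => simp
  | succ n =>
    rw [List.replicate_succ, List.cons_append, nen]
    rw [show ('.' :: (List.replicate n '.' ++ l)) = List.replicate (n+1) '.' ++ l by
          simp [List.replicate_succ]]
    rw [takeWhile_replicate_dot _ _ hl, dropWhile_replicate_dot _ _ hl]
    simp

lemma rowA_eq (cs : List String) : ∀ (acc : List String) (k : Nat), cs.all validCell = true →
    rowA cs acc k = acc ++ nen (List.replicate k '.' ++ cs.map mapChar) := by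
  induction cs with
  | nil =>
    intro acc k _
    rw [rowA]
    simp only [List.map_nil]
    rw [nen_replicate k [] (by decide)]
    cases k with
    | zero => simp [nen]
    | succ n => simp [nen]
  | cons c cs ih =>
    intro acc k hv
    simp only [List.all_cons, Bool.and_eq_true] at hv
    by_cases hc : c = "-"
    · subst hc
      rw [rowA, if_pos rfl, ih _ _ hv.2]
      congr 1
      simp [mapChar, List.replicate_succ']
    · rw [rowA, if_neg hc, ih _ _ hv.2, List.map_cons]
      have hd : (mapChar c :: cs.map mapChar).headD 'x' ≠ '.' := by
        simpa using mapChar_ne_dot c hv.1 hc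
      rw [nen_replicate k _ hd, nen]
      rw [if_neg (mapChar_ne_dot c hv.1 hc)]
      have hstr : String.ofList [mapChar c] = quanCoToFen.getD c "" := by
        rw [← cell_toList c hv.1 hc, String.ofList_toList]
      rw [hstr]
      cases k with
      | zero => simp
      | succ n => simp

lemma mapped_toList (row : List String) (hv : row.all validCell = true) :
    (PySem.Str.join "" (row.map (fun cell =>
      if cell = "-" then "." else quanCoToFen.getD cell ""))).toList = row.map mapChar := by
  rw [PySem.Str.toList_join]
  have : (row.map (fun cell => if cell = "-" then "." else quanCoToFen.getD cell "")).map String.toList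
       = (row.map mapChar).map ([·]) := by
    simp only [List.map_map, List.map_inj_left]
    intro c hc
    have hvc : validCell c = true := by
      rw [List.all_eq_true] at hv; exact hv c hc
    by_cases h : c = "-"
    · subst h; simp [mapChar]
    · simp [h, cell_toList c hvc h]
  simp only [List.map_map] at this ⊢
  rw [this]
  have h0 : ("" : String).toList = [] := rfl
  rw [h0, ← List.map_map, PySem.Chars.join_nil_singletons]

lemma row_eq (row : List String) (hv : row.all validCell = true) :
    PySem.Str.join "" (rowA row [] 0) =
    PySem.Str.join "" (nen (PySem.Str.join "" (row.map (fun cell =>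
      if cell = "-" then "." else quanCoToFen.getD cell ""))).toList) := by
  rw [rowA_eq row [] 0 hv, mapped_toList row hv]
  simp

-- ===== VERDICT (by name: the statement is the Claim_ definition above) =====
theorem ChuyenDoiSangFEN_spec : Claim_equal_ChuyenDoiSangFEN := by
  intro bm luot _ hpre
  unfold Spec_ChuyenDoiSangFEN ChuyenDoiSangFEN ChuyenDoiSangFEN_alt
  have hrows : bm.map (fun row => PySem.Str.join "" (rowA row [] 0)) =
      bm.map (fun row => PySem.Str.join "" (nen (PySem.Str.join "" (row.map (fun cell =>
        if cell = "-" then "." else quanCoToFen.getD cell ""))).toList)) := by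
    apply List.map_congr_left
    intro row hrow
    unfold Pre_ChuyenDoiSangFEN at hpre
    rw [List.all_eq_true] at hpre
    exact row_eq row (hpre row hrow)
  rw [hrows]
  simp only [String.append_assoc]
  rw [show (" " ++ ("KQkq" ++ (" " ++ ("-" ++ (" " ++ ("0" ++ (" " ++ "1"))))))) = (" KQkq - 0 1" : String) from rfl]
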